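-- pv_equiv track=rewrite | github.com/huawei-noah/noah-research | NLP/text2code_mrpt/source/sample_concatenation.py | concatenate_examples
-- ===== SOURCE A (Python) =====
-- def concatenate_examples(tokenized_data, max_seq_length):
-- 	"""
-- 	Approach No1, concatenate examples naively to target for maximum randomization
-- 	"""
-- 	buffers = {}
-- 	concatenated_examples = {}
--
-- 	ks = list(tokenized_data.keys())
-- 	for key_name in ks:
-- 		if key_name not in buffers:
-- 			buffers[key_name] = []
--
-- 		if key_name not in concatenated_examples:
-- 			concatenated_examples[key_name] = []
--
-- 	for ex, example_input in enumerate(tokenized_data['input_ids']):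
--
-- 		if len(buffers['input_ids']) + len(example_input) <= max_seq_length:  # great, actually concatenate this
-- 			for key_name in ks:
-- 				if isinstance(tokenized_data[key_name][ex], list):
-- 					buffers[key_name].extend(tokenized_data[key_name][ex])  # augment buffers
-- 				else:
-- 					buffers[key_name].extend([tokenized_data[key_name][ex]])
--
-- 		else:
-- 			# if the concatenated example surpasses the length, then return the buffer and add the example in a new one
-- 			for key_name in ks:
-- 				concatenated_examples[key_name].append(buffers[key_name])  # add existing buffers
-- 				buffers[key_name] = []  # empty
-- 				if isinstance(tokenized_data[key_name][ex], list):
-- 					buffers[key_name].extend(tokenized_data[key_name][ex])  # augment buffers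
-- 				else:
-- 					buffers[key_name].extend([tokenized_data[key_name][ex]])
--
-- 	if len(buffers['input_ids']) > 0:
-- 		for key_name in ks:
-- 			concatenated_examples[key_name].append(buffers[key_name])
-- 			buffers[key_name] = []
--
-- 	return concatenated_examples
-- ===== SOURCE B (Python) =====
-- def concatenate_examples(tokenized_data, max_seq_length):
--     groups = []
--     cur = []
--     run_len = 0
--     for ex, item in enumerate(tokenized_data['input_ids']):
--         n = len(item) if isinstance(item, list) else 1
--         if run_len + n > max_seq_length:
--             groups.append(cur)
--             cur = [ex]
--             run_len = n
--         else:
--             cur.append(ex)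
--             run_len += n
--     if run_len > 0:
--         groups.append(cur)
--
--     def as_list(x):
--         return x if isinstance(x, list) else [x]
--
--     return {key: [[tok for i in g for tok in as_list(vals[i])] for g in groups]
--             for key, vals in tokenized_data.items()}
-- ===== Notes on version B (the rewrite author's own statement) =====
-- stated objective: alternative
-- what changed: B splits A's single pass of per-example per-key dict/buffer mutation into a first pass over input_ids alone that computes the greedy index groups, then builds each key's concatenated buffers independently by comprehension; same asymptotic cost.
import Mathlib
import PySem

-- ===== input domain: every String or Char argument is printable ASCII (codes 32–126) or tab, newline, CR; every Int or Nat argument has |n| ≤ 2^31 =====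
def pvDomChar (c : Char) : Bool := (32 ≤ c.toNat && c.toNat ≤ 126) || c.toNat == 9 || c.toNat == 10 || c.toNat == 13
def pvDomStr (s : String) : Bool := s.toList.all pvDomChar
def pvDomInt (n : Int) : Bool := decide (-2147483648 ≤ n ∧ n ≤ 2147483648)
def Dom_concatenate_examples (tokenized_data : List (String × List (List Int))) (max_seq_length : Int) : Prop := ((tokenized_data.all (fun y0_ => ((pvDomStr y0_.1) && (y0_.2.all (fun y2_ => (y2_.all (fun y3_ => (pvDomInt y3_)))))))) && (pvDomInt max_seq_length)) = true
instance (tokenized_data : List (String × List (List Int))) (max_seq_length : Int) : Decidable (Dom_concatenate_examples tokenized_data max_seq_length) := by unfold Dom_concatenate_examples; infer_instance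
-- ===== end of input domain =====

-- B replaces A's per-example per-key dict/buffer mutation by two passes: a first pass over
-- input_ids alone computing the greedy index groups, then one comprehension per key building
-- the concatenated buffers (objective: alternative decomposition, same asymptotic cost).

-- ===== PORT A =====
-- In the typed domain every tokenized_data[key][ex] is a list, so the 'isinstance(..., list)'
-- branch of A always takes the extend-with-the-list path; the scalar branch is unreachable here.
def concatenate_examples (tokenized_data : List (String × List (List Int))) (max_seq_length : Int) : List (String × List (List Int)) :=
  let td := PySem.Dict.mk tokenized_data
  let ks := td.keys
  -- buffers = {}; concatenated_examples = {}; for key in ks: if absent, set to []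
  let init : PySem.Dict String (List Int) × PySem.Dict String (List (List Int)) :=
    ks.foldl (fun bc k =>
      ( if bc.1.contains k then bc.1 else bc.1.insert k []
      , if bc.2.contains k then bc.2 else bc.2.insert k [] ))
      (PySem.Dict.empty, PySem.Dict.empty)
  -- for ex, example_input in enumerate(tokenized_data['input_ids']): …
  let st := (PySem.List.enumerate (td.getD "input_ids" [])).foldl
    (fun (bc : PySem.Dict String (List Int) × PySem.Dict String (List (List Int))) p =>
      if ((bc.1.getD "input_ids" []).length : Int) + (p.2.length : Int) ≤ max_seq_length then
        (ks.foldl (fun b k => b.insert k (b.getD k [] ++ PySem.List.pyGetD (td.getD k []) p.1 [])) bc.1, bc.2)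
      else
        ks.foldl (fun bc2 k =>
          let c := bc2.2.insert k (bc2.2.getD k [] ++ [bc2.1.getD k []])
          let b := bc2.1.insert k ([] ++ PySem.List.pyGetD (td.getD k []) p.1 [])
          (b, c)) bc)
    init
  -- if len(buffers['input_ids']) > 0: flush (the final buffers[key] = [] does not affect the result)
  let conc :=
    if ((st.1.getD "input_ids" []).length : Int) > 0 then
      ks.foldl (fun c k => c.insert k (c.getD k [] ++ [st.1.getD k []])) st.2
    else st.2
  conc.items

-- ===== PORT B =====
-- [tok for i in g for tok in vals[i]]  (every vals[i] is a list in the typed domain)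
def pvFlat (g : List Int) (vals : List (List Int)) : List Int :=
  g.flatMap (fun i => PySem.List.pyGetD vals i [])

-- one step of B's first pass: state (groups, cur, run_len), input (ex, item)
def pvGroupsStep (max_seq_length : Int) (st : List (List Int) × List Int × Int) (p : Int × List Int) :
    List (List Int) × List Int × Int :=
  if st.2.2 + (p.2.length : Int) > max_seq_length then (st.1 ++ [st.2.1], [p.1], (p.2.length : Int))
  else (st.1, st.2.1 ++ [p.1], st.2.2 + (p.2.length : Int))

def concatenate_examples_alt (tokenized_data : List (String × List (List Int))) (max_seq_length : Int) : List (String × List (List Int)) :=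
  let input_ids := (PySem.Dict.mk tokenized_data).getD "input_ids" []
  let st := (PySem.List.enumerate input_ids).foldl (pvGroupsStep max_seq_length) ([], [], 0)
  let groups := if st.2.2 > 0 then st.1 ++ [st.2.1] else st.1
  tokenized_data.map (fun q => (q.1, groups.map (fun g => pvFlat g q.2)))

-- ===== PRECONDITION & SPEC =====
-- Pre_ excludes (a) inputs where Python A raises: a missing 'input_ids' key (KeyError) or some
-- value list shorter than the 'input_ids' list (IndexError), and (b) association lists with
-- duplicate keys, which cannot arise from a Python dict (A's keys-loop would process such a key
-- twice per example, an artefact of the representation, not of any Python input).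
def Pre_concatenate_examples (tokenized_data : List (String × List (List Int))) (max_seq_length : Int) : Prop :=
  (tokenized_data.map Prod.fst).Nodup ∧
  "input_ids" ∈ tokenized_data.map Prod.fst ∧
  ∀ p ∈ tokenized_data, ((PySem.Dict.mk tokenized_data).getD "input_ids" []).length ≤ p.2.length
instance (tokenized_data : List (String × List (List Int))) (max_seq_length : Int) : Decidable (Pre_concatenate_examples tokenized_data max_seq_length) := by unfold Pre_concatenate_examples; infer_instance

def pvWitness_concatenate_examples : (List (String × List (List Int))) × Int :=
  ([("input_ids", [[1, 2], [3], [4, 5, 6]]), ("labels", [[0], [1, 1], [0, 0]])], 3)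

def Spec_concatenate_examples (tokenized_data : List (String × List (List Int))) (max_seq_length : Int) (out : List (String × List (List Int))) : Prop := out = concatenate_examples_alt tokenized_data max_seq_length
instance (tokenized_data : List (String × List (List Int))) (max_seq_length : Int) (out : List (String × List (List Int))) : Decidable (Spec_concatenate_examples tokenized_data max_seq_length out) := by unfold Spec_concatenate_examples; infer_instance

-- ===== CLAIM (what is proved, stated in full; the proofs are below) =====
def Claim_equal_concatenate_examples : Prop := ∀ (tokenized_data : List (String × List (List Int))) (max_seq_length : Int), Dom_concatenate_examples tokenized_data max_seq_length → Pre_concatenate_examples tokenized_data max_seq_length → Spec_concatenate_examples tokenized_data max_seq_length (concatenate_examples tokenized_data max_seq_length)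

-- ===== LEMMAS AND PROOFS =====

theorem pv_map_fst_map {α β γ : Type} (l : List (α × β)) (g : α × β → γ) :
    (l.map (fun q => (q.1, g q))).map Prod.fst = l.map Prod.fst := by
  simp [List.map_map, Function.comp]

theorem pv_insert_mk_mid {β : Type} (pre post : List (String × β)) (k : String) (v w : β)
    (h : ((pre ++ (k, v) :: post).map Prod.fst).Nodup) :
    (PySem.Dict.mk (pre ++ (k, v) :: post)).insert k w = PySem.Dict.mk (pre ++ (k, w) :: post) := by
  have hpre : ∀ p ∈ pre, p.1 ≠ k := by
    intro p hp hpk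
    simp only [List.map_append, List.map_cons, List.nodup_append, List.mem_cons] at h
    exact h.2.2 p.1 (List.mem_map.mpr ⟨p, hp, rfl⟩) k (Or.inl rfl) hpk
  have hpost : ∀ p ∈ post, p.1 ≠ k := by
    intro p hp hpk
    simp only [List.map_append, List.map_cons, List.nodup_append, List.nodup_cons] at h
    exact h.2.1.1 (hpk ▸ List.mem_map.mpr ⟨p, hp, rfl⟩)
  have hc : (PySem.Dict.mk (pre ++ (k, v) :: post)).contains k = true := by
    rw [PySem.Dict.contains_eq_decide_mem_keys]
    simp [PySem.Dict.keys]
  apply PySem.Dict.ext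
  rw [PySem.Dict.items_insert]
  simp only [hc, if_true]
  show (pre ++ (k, v) :: post).map _ = _
  rw [List.map_append, List.map_cons]
  simp only [BEq.rfl, if_true]
  congr 1
  · calc pre.map (fun p => if (p.1 == k) = true then (k, w) else p) = pre.map id :=
        List.map_congr_left (fun p hp => by simp [hpre p hp])
      _ = pre := List.map_id pre
  · congr 1
    calc post.map (fun p => if (p.1 == k) = true then (k, w) else p) = post.map id :=
        List.map_congr_left (fun p hp => by simp [hpost p hp])
      _ = post := List.map_id post

theorem pv_getD_mk {β : Type} (l : List (String × β)) (k : String) (v : β) (d0 : β)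
    (hm : (k, v) ∈ l) (hnd : (l.map Prod.fst).Nodup) :
    (PySem.Dict.mk l).getD k d0 = v :=
  PySem.Dict.getD_of_mem_items _ hm hnd d0

theorem pv_fold_insert_keys {α β : Type} (fb : String × α → β)
    (f : PySem.Dict String β → String → PySem.Dict String β)
    (upd : String → β → β) (dflt : β)
    (hf : ∀ d k, f d k = d.insert k (upd k (d.getD k dflt))) :
    ∀ (post pre : List (String × α)), ((pre ++ post).map Prod.fst).Nodup →
      (post.map Prod.fst).foldl f
        (PySem.Dict.mk (pre.map (fun q => (q.1, upd q.1 (fb q))) ++ post.map (fun q => (q.1, fb q))))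
        = PySem.Dict.mk ((pre ++ post).map (fun q => (q.1, upd q.1 (fb q)))) := by
  intro post
  induction post with
  | nil => intro pre h; simp
  | cons q post ih =>
    intro pre h
    obtain ⟨k, a⟩ := q
    have hnd1 : ((pre.map (fun q => (q.1, upd q.1 (fb q))) ++
        (k, fb (k, a)) :: post.map (fun q => (q.1, fb q))).map Prod.fst).Nodup := by
      simpa [pv_map_fst_map] using h
    simp only [List.map_cons, List.foldl_cons, hf]
    rw [pv_getD_mk _ k (fb (k, a)) dflt (by simp) hnd1,
        pv_insert_mk_mid _ _ k (fb (k, a)) (upd k (fb (k, a))) hnd1]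
    have h2 : (((pre ++ [(k, a)]) ++ post).map Prod.fst).Nodup := by simpa using h
    have := ih (pre ++ [(k, a)]) h2
    simp only [List.map_append, List.map_cons, List.map_nil, List.append_assoc,
      List.cons_append, List.nil_append] at this ⊢
    exact this

theorem pv_fold_insert_keys2 {α β₁ β₂ : Type} (fb : String × α → β₁) (fc : String × α → β₂)
    (f : PySem.Dict String β₁ × PySem.Dict String β₂ → String →
         PySem.Dict String β₁ × PySem.Dict String β₂)
    (updB : String → β₁ → β₂ → β₁) (updC : String → β₁ → β₂ → β₂) (d1 : β₁) (d2 : β₂)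
    (hf : ∀ bc k, f bc k =
      (bc.1.insert k (updB k (bc.1.getD k d1) (bc.2.getD k d2)),
       bc.2.insert k (updC k (bc.1.getD k d1) (bc.2.getD k d2)))) :
    ∀ (post pre : List (String × α)), ((pre ++ post).map Prod.fst).Nodup →
      (post.map Prod.fst).foldl f
        (PySem.Dict.mk (pre.map (fun q => (q.1, updB q.1 (fb q) (fc q))) ++ post.map (fun q => (q.1, fb q))),
         PySem.Dict.mk (pre.map (fun q => (q.1, updC q.1 (fb q) (fc q))) ++ post.map (fun q => (q.1, fc q))))
      = (PySem.Dict.mk ((pre ++ post).map (fun q => (q.1, updB q.1 (fb q) (fc q)))),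
         PySem.Dict.mk ((pre ++ post).map (fun q => (q.1, updC q.1 (fb q) (fc q))))) := by
  intro post
  induction post with
  | nil => intro pre h; simp
  | cons q post ih =>
    intro pre h
    obtain ⟨k, a⟩ := q
    have hnd1 : ((pre.map (fun q => (q.1, updB q.1 (fb q) (fc q))) ++
        (k, fb (k, a)) :: post.map (fun q => (q.1, fb q))).map Prod.fst).Nodup := by
      simpa [pv_map_fst_map] using h
    have hnd2 : ((pre.map (fun q => (q.1, updC q.1 (fb q) (fc q))) ++
        (k, fc (k, a)) :: post.map (fun q => (q.1, fc q))).map Prod.fst).Nodup := by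
      simpa [pv_map_fst_map] using h
    simp only [List.map_cons, List.foldl_cons, hf]
    rw [pv_getD_mk _ k (fb (k, a)) d1 (by simp) hnd1,
        pv_getD_mk _ k (fc (k, a)) d2 (by simp) hnd2,
        pv_insert_mk_mid _ _ k (fb (k, a)) _ hnd1,
        pv_insert_mk_mid _ _ k (fc (k, a)) _ hnd2]
    have h2 : (((pre ++ [(k, a)]) ++ post).map Prod.fst).Nodup := by simpa using h
    have := ih (pre ++ [(k, a)]) h2
    simp only [List.map_append, List.map_cons, List.map_nil, List.append_assoc,
      List.cons_append, List.nil_append] at this ⊢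
    exact this

theorem pv_init {β : Type} (e : β)
    (f : PySem.Dict String β → String → PySem.Dict String β)
    (hf : ∀ d k, f d k = if d.contains k then d else d.insert k e) :
    ∀ (ks pre : List String), (pre ++ ks).Nodup →
      ks.foldl f (PySem.Dict.mk (pre.map (fun k => (k, e))))
        = PySem.Dict.mk ((pre ++ ks).map (fun k => (k, e))) := by
  intro ks
  induction ks with
  | nil => intro pre h; simp
  | cons k ks ih =>
    intro pre h
    have hk : k ∉ pre := by
      intro hk
      rw [List.nodup_append] at h
      exact h.2.2 k hk k (by simp) rfl
    have hc : (PySem.Dict.mk (pre.map (fun k => (k, e)))).contains k = false := by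
      rw [PySem.Dict.contains_eq_decide_mem_keys]
      simp [List.map_map, Function.comp, hk]
    simp only [List.foldl_cons, hf, hc, Bool.false_eq_true, if_false]
    have hins : (PySem.Dict.mk (pre.map (fun k => (k, e)))).insert k e
        = PySem.Dict.mk ((pre ++ [k]).map (fun k => (k, e))) := by
      apply PySem.Dict.ext
      rw [PySem.Dict.items_insert]
      simp [hc]
    rw [hins]
    have h2 : ((pre ++ [k]) ++ ks).Nodup := by simpa using h
    have := ih (pre ++ [k]) h2
    simpa using this

theorem pvFlat_append (g h : List Int) (v : List (List Int)) :
    pvFlat (g ++ h) v = pvFlat g v ++ pvFlat h v := by simp [pvFlat]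

theorem pvFlat_single (x : Int) (v : List (List Int)) :
    pvFlat [x] v = PySem.List.pyGetD v x [] := by simp [pvFlat]

theorem pv_cor1 (td : List (String × List (List Int)))
    (hnd : (td.map Prod.fst).Nodup) (cur : List Int) (ex : Int) :
    (td.map Prod.fst).foldl
      (fun b k => b.insert k (b.getD k [] ++ PySem.List.pyGetD ((PySem.Dict.mk td).getD k []) ex []))
      (PySem.Dict.mk (td.map (fun q => (q.1, pvFlat cur q.2))))
    = PySem.Dict.mk (td.map (fun q => (q.1, pvFlat (cur ++ [ex]) q.2))) := by
  have := pv_fold_insert_keys (fun (q : String × List (List Int)) => pvFlat cur q.2)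
    (fun b k => b.insert k (b.getD k [] ++ PySem.List.pyGetD ((PySem.Dict.mk td).getD k []) ex []))
    (fun k x => x ++ PySem.List.pyGetD ((PySem.Dict.mk td).getD k []) ex []) []
    (fun d k => rfl) td [] (by rw [List.nil_append]; exact hnd)
  simp only [List.map_nil, List.nil_append] at this
  rw [this]
  congr 1
  apply List.map_congr_left
  intro q hq
  rw [pv_getD_mk td q.1 q.2 [] hq hnd, pvFlat_append, pvFlat_single]

theorem pv_cor2 (td : List (String × List (List Int)))
    (hnd : (td.map Prod.fst).Nodup) (cur : List Int) (gs : List (List Int)) (ex : Int) :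
    (td.map Prod.fst).foldl
      (fun bc2 k =>
        (bc2.1.insert k ([] ++ PySem.List.pyGetD ((PySem.Dict.mk td).getD k []) ex []),
         bc2.2.insert k (bc2.2.getD k [] ++ [bc2.1.getD k []])))
      (PySem.Dict.mk (td.map (fun q => (q.1, pvFlat cur q.2))),
       PySem.Dict.mk (td.map (fun q => (q.1, gs.map (fun g => pvFlat g q.2)))))
    = (PySem.Dict.mk (td.map (fun q => (q.1, pvFlat [ex] q.2))),
       PySem.Dict.mk (td.map (fun q => (q.1, (gs ++ [cur]).map (fun g => pvFlat g q.2))))) := by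
  have := pv_fold_insert_keys2
    (fun (q : String × List (List Int)) => pvFlat cur q.2)
    (fun (q : String × List (List Int)) => gs.map (fun g => pvFlat g q.2))
    (fun bc2 k =>
      let c := bc2.2.insert k (bc2.2.getD k [] ++ [bc2.1.getD k []])
      let b := bc2.1.insert k ([] ++ PySem.List.pyGetD ((PySem.Dict.mk td).getD k []) ex [])
      (b, c))
    (fun k _ _ => [] ++ PySem.List.pyGetD ((PySem.Dict.mk td).getD k []) ex [])
    (fun _ b c => c ++ [b]) [] []
    (fun bc k => rfl) td [] (by rw [List.nil_append]; exact hnd)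
  simp only [List.map_nil, List.nil_append] at this
  refine Eq.trans this ?_
  refine Prod.ext ?_ ?_
  · show PySem.Dict.mk _ = PySem.Dict.mk _
    congr 1
    apply List.map_congr_left
    intro q hq
    rw [pv_getD_mk td q.1 q.2 [] hq hnd, pvFlat_single]
  · show PySem.Dict.mk _ = PySem.Dict.mk _
    congr 1
    apply List.map_congr_left
    intro q hq
    simp

theorem pv_cor3 (td : List (String × List (List Int)))
    (hnd : (td.map Prod.fst).Nodup) (cur : List Int) (gs : List (List Int)) :
    (td.map Prod.fst).foldl
      (fun c k => c.insert k (c.getD k [] ++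
        [(PySem.Dict.mk (td.map (fun q => (q.1, pvFlat cur q.2)))).getD k []]))
      (PySem.Dict.mk (td.map (fun q => (q.1, gs.map (fun g => pvFlat g q.2)))))
    = PySem.Dict.mk (td.map (fun q => (q.1, (gs ++ [cur]).map (fun g => pvFlat g q.2)))) := by
  have := pv_fold_insert_keys
    (fun (q : String × List (List Int)) => gs.map (fun g => pvFlat g q.2))
    (fun c k => c.insert k (c.getD k [] ++
      [(PySem.Dict.mk (td.map (fun q => (q.1, pvFlat cur q.2)))).getD k []]))
    (fun k x => x ++ [(PySem.Dict.mk (td.map (fun q => (q.1, pvFlat cur q.2)))).getD k []]) []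
    (fun d k => rfl) td [] (by rw [List.nil_append]; exact hnd)
  simp only [List.map_nil, List.nil_append] at this
  rw [this]
  congr 1
  apply List.map_congr_left
  intro q hq
  rw [pv_getD_mk (td.map (fun q => (q.1, pvFlat cur q.2))) q.1 (pvFlat cur q.2) []
      (List.mem_map.mpr ⟨q, hq, rfl⟩) (by rw [pv_map_fst_map]; exact hnd)]
  simp

theorem pv_run_append (cur : List Int) (x : Int) (v₀ : List (List Int)) (item : List Int)
    (hp : PySem.List.pyGetD v₀ x ([] : List Int) = item) :
    ((pvFlat cur v₀).length : Int) + (item.length : Int) = ((pvFlat (cur ++ [x]) v₀).length : Int) := by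
  rw [pvFlat_append, pvFlat_single, hp, List.length_append]
  push_cast
  ring

theorem pv_loop (td : List (String × List (List Int))) (mx : Int)
    (hnd : (td.map Prod.fst).Nodup) (v₀ : List (List Int))
    (hmem : ("input_ids", v₀) ∈ td) :
    ∀ (es : List (Int × List Int)),
      (∀ p ∈ es, PySem.List.pyGetD v₀ p.1 ([] : List Int) = p.2) →
      ∀ (gs : List (List Int)) (cur : List Int),
      es.foldl
        (fun bc p =>
          if ((bc.1.getD "input_ids" []).length : Int) + (p.2.length : Int) ≤ mx then
            (((PySem.Dict.mk td).keys).foldl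
              (fun b k => b.insert k (b.getD k [] ++ PySem.List.pyGetD ((PySem.Dict.mk td).getD k []) p.1 [])) bc.1,
             bc.2)
          else
            ((PySem.Dict.mk td).keys).foldl
              (fun bc2 k =>
                let c := bc2.2.insert k (bc2.2.getD k [] ++ [bc2.1.getD k []])
                let b := bc2.1.insert k ([] ++ PySem.List.pyGetD ((PySem.Dict.mk td).getD k []) p.1 [])
                (b, c)) bc)
        (PySem.Dict.mk (td.map (fun q => (q.1, pvFlat cur q.2))),
         PySem.Dict.mk (td.map (fun q => (q.1, gs.map (fun g => pvFlat g q.2)))))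
      = (PySem.Dict.mk (td.map (fun q => (q.1,
            pvFlat (es.foldl (pvGroupsStep mx) (gs, cur, ((pvFlat cur v₀).length : Int))).2.1 q.2))),
         PySem.Dict.mk (td.map (fun q => (q.1,
            (es.foldl (pvGroupsStep mx) (gs, cur, ((pvFlat cur v₀).length : Int))).1.map (fun g => pvFlat g q.2))))) := by
  intro es
  induction es with
  | nil => intro _ gs cur; simp
  | cons p es ih =>
    intro hes gs cur
    have hp : PySem.List.pyGetD v₀ p.1 ([] : List Int) = p.2 := hes p (by simp)
    have hes' : ∀ q ∈ es, PySem.List.pyGetD v₀ q.1 ([] : List Int) = q.2 :=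
      fun q hq => hes q (by simp [hq])
    have hkeys : (PySem.Dict.mk td).keys = td.map Prod.fst := rfl
    have hget : (PySem.Dict.mk (td.map (fun q => (q.1, pvFlat cur q.2)))).getD "input_ids" []
        = pvFlat cur v₀ :=
      pv_getD_mk _ _ _ _ (List.mem_map.mpr ⟨("input_ids", v₀), hmem, rfl⟩)
        (by rw [pv_map_fst_map]; exact hnd)
    simp only [List.foldl_cons]
    by_cases hc : ((pvFlat cur v₀).length : Int) + (p.2.length : Int) ≤ mx
    · rw [show (pvGroupsStep mx (gs, cur, ((pvFlat cur v₀).length : Int)) p)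
          = (gs, cur ++ [p.1], ((pvFlat (cur ++ [p.1]) v₀).length : Int)) from by
        simp only [pvGroupsStep]
        rw [if_neg (by simp only [not_lt]; exact hc), pv_run_append cur p.1 v₀ p.2 hp]]
      rw [hget, if_pos hc, hkeys, pv_cor1 td hnd cur p.1]
      exact ih hes' gs (cur ++ [p.1])
    · rw [show (pvGroupsStep mx (gs, cur, ((pvFlat cur v₀).length : Int)) p)
          = (gs ++ [cur], [p.1], ((pvFlat [p.1] v₀).length : Int)) from by
        simp only [pvGroupsStep]
        rw [if_pos (by omega), pvFlat_single, hp]]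
      rw [hget, if_neg hc, hkeys, pv_cor2 td hnd cur gs p.1]
      exact ih hes' (gs ++ [cur]) [p.1]

theorem pv_run_inv (v₀ : List (List Int)) (mx : Int) :
    ∀ (es : List (Int × List Int)),
      (∀ p ∈ es, PySem.List.pyGetD v₀ p.1 ([] : List Int) = p.2) →
      ∀ (gs : List (List Int)) (cur : List Int) (r : Int),
        r = ((pvFlat cur v₀).length : Int) →
        (es.foldl (pvGroupsStep mx) (gs, cur, r)).2.2
          = ((pvFlat (es.foldl (pvGroupsStep mx) (gs, cur, r)).2.1 v₀).length : Int) := by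
  intro es
  induction es with
  | nil => intro _ gs cur r hr; simpa using hr
  | cons p es ih =>
    intro hes gs cur r hr
    have hp : PySem.List.pyGetD v₀ p.1 ([] : List Int) = p.2 := hes p (by simp)
    have hes' : ∀ q ∈ es, PySem.List.pyGetD v₀ q.1 ([] : List Int) = q.2 :=
      fun q hq => hes q (by simp [hq])
    subst hr
    simp only [List.foldl_cons, pvGroupsStep]
    by_cases hc : ((pvFlat cur v₀).length : Int) + ((p.2.length : Nat) : Int) > mx
    · rw [if_pos hc]
      exact ih hes' (gs ++ [cur]) [p.1] _ (by rw [pvFlat_single, hp])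
    · rw [if_neg hc]
      exact ih hes' gs (cur ++ [p.1]) _ (pv_run_append cur p.1 v₀ p.2 hp)

theorem pv_hes (v₀ : List (List Int)) :
    ∀ p ∈ PySem.List.enumerate v₀, PySem.List.pyGetD v₀ p.1 ([] : List Int) = p.2 := by
  intro p hp
  rw [PySem.List.mem_enumerate_iff] at hp
  obtain ⟨k, hk, rfl⟩ := hp
  simp [PySem.List.pyGetD_natCast, List.getD_eq_getElem?_getD, hk]

-- ===== VERDICT (by name: the statement is the Claim_ definition above) =====
theorem concatenate_examples_spec : Claim_equal_concatenate_examples := by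
  intro td mx hdom hpre
  obtain ⟨hnd, hkey, hlen⟩ := hpre
  obtain ⟨q, hq, hfst⟩ := List.mem_map.1 hkey
  obtain ⟨k0, v₀⟩ := q
  cases hfst
  have hmem : ("input_ids", v₀) ∈ td := hq
  have hv : (PySem.Dict.mk td).getD "input_ids" [] = v₀ := pv_getD_mk td _ _ _ hmem hnd
  show concatenate_examples td mx = concatenate_examples_alt td mx
  simp only [concatenate_examples, concatenate_examples_alt]
  rw [hv]
  have hkeys : (PySem.Dict.mk td).keys = td.map Prod.fst := rfl
  have hinit : (List.foldl
      (fun (bc : PySem.Dict String (List Int) × PySem.Dict String (List (List Int))) (k : String) =>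
        (if bc.1.contains k = true then bc.1 else bc.1.insert k [],
         if bc.2.contains k = true then bc.2 else bc.2.insert k []))
      (PySem.Dict.empty, PySem.Dict.empty) ((PySem.Dict.mk td).keys))
      = (PySem.Dict.mk (td.map (fun q => (q.1, pvFlat [] q.2))),
         PySem.Dict.mk (td.map (fun q => (q.1, List.map (fun g => pvFlat g q.2) ([] : List (List Int)))))) := by
    refine Eq.trans (PySem.List.foldl_prod_mk
      (fun (d : PySem.Dict String (List Int)) (k : String) =>
        if d.contains k = true then d else d.insert k [])
      (fun (d : PySem.Dict String (List (List Int))) (k : String) =>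
        if d.contains k = true then d else d.insert k [])
      ((PySem.Dict.mk td).keys) PySem.Dict.empty PySem.Dict.empty) ?_
    refine Prod.ext ?_ ?_
    · have h1 := pv_init ([] : List Int) _ (fun d k => rfl) (td.map Prod.fst) [] (by simpa using hnd)
      simp only [List.map_nil, List.nil_append] at h1
      exact h1.trans (by rw [List.map_map]; congr 1)
    · have h2 := pv_init ([] : List (List Int)) _ (fun d k => rfl) (td.map Prod.fst) [] (by simpa using hnd)
      simp only [List.map_nil, List.nil_append] at h2
      exact h2.trans (by rw [List.map_map]; congr 1)
  rw [hinit]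
  rw [pv_loop td mx hnd v₀ hmem (PySem.List.enumerate v₀) (pv_hes v₀) [] []]
  rw [show ((pvFlat ([] : List Int) v₀).length : Int) = (0 : Int) from rfl]
  have hget2 : (PySem.Dict.mk (td.map (fun q => (q.1,
      pvFlat (((PySem.List.enumerate v₀).foldl (pvGroupsStep mx) ([], [], 0)).2.1) q.2)))).getD "input_ids" []
      = pvFlat (((PySem.List.enumerate v₀).foldl (pvGroupsStep mx) ([], [], 0)).2.1) v₀ :=
    pv_getD_mk _ _ _ _ (List.mem_map.mpr ⟨("input_ids", v₀), hmem, rfl⟩)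
      (by rw [pv_map_fst_map]; exact hnd)
  rw [hget2]
  have hrun := pv_run_inv v₀ mx (PySem.List.enumerate v₀) (pv_hes v₀) [] [] 0 rfl
  rw [hrun]
  by_cases hpos : ((pvFlat (((PySem.List.enumerate v₀).foldl (pvGroupsStep mx) ([], [], 0)).2.1) v₀).length : Int) > 0
  · rw [if_pos hpos, if_pos hpos, hkeys,
      pv_cor3 td hnd (((PySem.List.enumerate v₀).foldl (pvGroupsStep mx) ([], [], 0)).2.1)
        (((PySem.List.enumerate v₀).foldl (pvGroupsStep mx) ([], [], 0)).1)]
  · rw [if_neg hpos, if_neg hpos]
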